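-- pv_equiv track=rewrite | github.com/BARarch/My-Hackerranks | amendTheSent190928.py | amendTheSentence
-- ===== SOURCE A (Python) =====
-- def amendTheSentence(s):
--     end = 0
--     start = 0
--     res = []
--     while end < len(s):
--         if s[end].isupper():
--             res.append(s[start:end].lower())
--             start = end
--         end += 1
--
--     res.append(s[start:end].lower())
--     return " ".join(res).strip()
-- ===== SOURCE B (Python) =====
-- def amendTheSentence(s):
--     return "".join((" " + c.lower()) if c.isupper() else c for c in s).strip()
-- ===== Notes on version B (the rewrite author's own statement) =====
-- stated objective: simpler
-- what changed: Replaces the index/slice word-list machinery (start/end pointers, appended slices, ' '.join) with a single generator pass that injects a space before each uppercase letter while lowercasing it, joins and strips.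
import Mathlib
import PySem

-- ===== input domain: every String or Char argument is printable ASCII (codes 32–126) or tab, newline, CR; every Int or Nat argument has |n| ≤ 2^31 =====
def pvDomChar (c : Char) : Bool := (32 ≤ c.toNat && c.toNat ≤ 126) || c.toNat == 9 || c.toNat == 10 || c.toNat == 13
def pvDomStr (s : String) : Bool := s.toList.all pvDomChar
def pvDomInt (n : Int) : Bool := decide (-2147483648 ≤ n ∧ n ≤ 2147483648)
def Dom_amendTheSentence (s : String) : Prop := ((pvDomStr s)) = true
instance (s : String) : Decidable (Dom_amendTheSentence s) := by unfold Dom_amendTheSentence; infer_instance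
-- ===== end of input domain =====

-- B injects a space before each uppercase letter in one pass instead of collecting index slices (simpler; same result).

-- ===== PORT A =====
-- the while loop of A: state (end, start, res); returns the final (start, res)
def amendLoopA (cs : List Char) (e st : Nat) (res : List (List Char)) :
    Nat × List (List Char) :=
  if h : e < cs.length then
    if PySem.Chars.isupper cs[e] then
      amendLoopA cs (e + 1) e
        (res ++ [PySem.Chars.lower (PySem.List.slice cs (some (st : Int)) (some (e : Int)))])
    else
      amendLoopA cs (e + 1) st res
  else (st, res)
termination_by cs.length - e

def amendTheSentence (s : String) : String :=
  String.ofList (PySem.Chars.strip (PySem.Chars.join [' ']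
    ((amendLoopA s.toList 0 0 []).2 ++
      [PySem.Chars.lower (PySem.List.slice s.toList
        (some ((amendLoopA s.toList 0 0 []).1 : Int)) (some (s.toList.length : Int)))])))

-- ===== PORT B =====
def amendTheSentence_alt (s : String) : String :=
  String.ofList (PySem.Chars.strip (s.toList.flatMap (fun c =>
    if PySem.Chars.isupper c then [' ', PySem.Chars.lowerChar c] else [c])))

-- ===== PRECONDITION & SPEC =====
def Spec_amendTheSentence (s : String) (out : String) : Prop := out = amendTheSentence_alt s
instance (s : String) (out : String) : Decidable (Spec_amendTheSentence s out) := by unfold Spec_amendTheSentence; infer_instance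

-- ===== CLAIM (what is proved, stated in full; the proofs are below) =====
def Claim_equal_amendTheSentence : Prop := ∀ (s : String), Dom_amendTheSentence s → Spec_amendTheSentence s (amendTheSentence s)

-- ===== LEMMAS AND PROOFS =====

def pvSeg (c : Char) : List Char :=
  if PySem.Chars.isupper c then [' ', PySem.Chars.lowerChar c] else [c]

-- appending inside the last piece appends after the join
theorem pvJoin_last_append (sep : List Char) (res : List (List Char)) (p q : List Char) :
    PySem.Chars.join sep (res ++ [p ++ q]) = PySem.Chars.join sep (res ++ [p]) ++ q := by
  induction res with
  | nil => simp [PySem.Chars.join, List.intercalate]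
  | cons r t ih =>
      cases t with
      | nil => simp [PySem.Chars.join, List.intercalate]
      | cons r' t' =>
          simp only [PySem.Chars.join, List.intercalate, List.cons_append,
            List.intersperse_cons₂, List.flatten_cons] at ih ⊢
          simp [ih]

-- a separator appears before a piece appended to a nonempty list
theorem pvJoin_snoc (sep : List Char) (res : List (List Char)) (x : List Char)
    (h : res ≠ []) :
    PySem.Chars.join sep (res ++ [x]) = PySem.Chars.join sep res ++ sep ++ x := by
  induction res with
  | nil => exact absurd rfl h
  | cons r t ih =>
      cases t with
      | nil => simp [PySem.Chars.join, List.intercalate]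
      | cons r' t' =>
          have ih' := ih (by simp)
          simp only [PySem.Chars.join, List.intercalate, List.cons_append,
            List.intersperse_cons₂, List.flatten_cons] at ih' ⊢
          simp [ih']

theorem pvTake_succ_drop (cs : List Char) (st e : Nat) (hst : st ≤ e) (he : e < cs.length) :
    (cs.drop st).take (e + 1 - st) = (cs.drop st).take (e - st) ++ [cs[e]] := by
  have h1 : e + 1 - st = (e - st) + 1 := by omega
  rw [h1, List.take_add_one]
  have h2 : (cs.drop st)[e - st]? = some cs[e] := by
    rw [List.getElem?_drop]
    have h3 : st + (e - st) = e := by omega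
    rw [h3, List.getElem?_eq_getElem he]
  simp [h2]

-- main loop invariant: the joined final word list equals the already-joined prefix plus B's
-- space-injected tail
theorem pvLoopA_join (cs : List Char) (e st : Nat) (res : List (List Char))
    (hst : st ≤ e) (he : e ≤ cs.length) :
    PySem.Chars.join [' ']
      ((amendLoopA cs e st res).2 ++
        [PySem.Chars.lower (PySem.List.slice cs (some ((amendLoopA cs e st res).1 : Int))
          (some (cs.length : Int)))]) =
    PySem.Chars.join [' '] (res ++ [PySem.Chars.lower ((cs.drop st).take (e - st))]) ++
      (cs.drop e).flatMap pvSeg := by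
  by_cases h : e < cs.length
  · have hdrop : cs.drop e = cs[e] :: cs.drop (e + 1) := List.drop_eq_getElem_cons h
    rw [amendLoopA]
    simp only [h, dif_pos]
    by_cases hu : PySem.Chars.isupper cs[e]
    · simp only [hu, if_pos]
      rw [pvLoopA_join cs (e + 1) e _ (by omega) (by omega)]
      rw [PySem.List.slice_natCast, hdrop]
      simp only [List.flatMap_cons]
      have hseg : pvSeg cs[e] = [' ', PySem.Chars.lowerChar cs[e]] := by simp [pvSeg, hu]
      rw [hseg]
      have htake : ((cs[e] :: cs.drop (e + 1)).take (e + 1 - e)) = [cs[e]] := by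
        have : e + 1 - e = 1 := by omega
        rw [this]; rfl
      rw [htake]
      have hlow : PySem.Chars.lower [cs[e]] = [PySem.Chars.lowerChar cs[e]] := by
        simp [PySem.Chars.lower]
      rw [hlow]
      rw [pvJoin_snoc [' '] (res ++ [PySem.Chars.lower ((cs.drop st).take (e - st))])
        [PySem.Chars.lowerChar cs[e]] (by simp)]
      simp
    · rw [if_neg hu]
      rw [pvLoopA_join cs (e + 1) st res (by omega) (by omega)]
      rw [pvTake_succ_drop cs st e hst h]
      have hlow : PySem.Chars.lower ((cs.drop st).take (e - st) ++ [cs[e]]) =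
          PySem.Chars.lower ((cs.drop st).take (e - st)) ++ [PySem.Chars.lowerChar cs[e]] := by
        simp [PySem.Chars.lower]
      rw [hlow, pvJoin_last_append]
      have hlc : PySem.Chars.lowerChar cs[e] = cs[e] := by
        simp [PySem.Chars.lowerChar, hu]
      have hseg : pvSeg cs[e] = [cs[e]] := by simp [pvSeg, hu]
      rw [hdrop, List.flatMap_cons, hseg, hlc]
      simp
  · have heq : e = cs.length := by omega
    rw [amendLoopA]
    simp only [h, dif_neg, not_false_iff]
    subst heq
    rw [PySem.List.slice_natCast]
    simp
termination_by cs.length - e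

-- ===== VERDICT (by name: the statement is the Claim_ definition above) =====
theorem amendTheSentence_spec : Claim_equal_amendTheSentence := by
  intro s _
  unfold Spec_amendTheSentence amendTheSentence amendTheSentence_alt
  have h := pvLoopA_join s.toList 0 0 [] (le_refl 0) (Nat.zero_le _)
  simp only [Nat.sub_zero, List.take_zero, List.drop_zero, List.nil_append] at h
  rw [h]
  have hjoin : PySem.Chars.join [' '] [PySem.Chars.lower ([] : List Char)] = [] := by
    simp [PySem.Chars.join, List.intercalate, PySem.Chars.lower]
  rw [hjoin]
  unfold pvSeg
  simp
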